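-- pv_equiv track=rewrite | github.com/maati01/ASD | ćwiczenia/cwiczenia08/zad6.py | DFS
-- ===== SOURCE A (Python) =====
-- def DFS(G,x,val,t): #implementacja dla list sasiedztwa, zakładam ze indeksuje od 0
--     n = len(G)
--     visited = [False]*n
--     parents = [None]*n
--
--     def dfs_visit(u):
--         visited[u] = True
--         for v in range(len(G[u])):
--             if not visited[v] and G[u][v] != 0 and abs(G[u][v] - val) <= t:
--                 parents[v] = u
--                 dfs_visit(v)
--     dfs_visit(x)
--     return parents
-- ===== SOURCE B (Python) =====
-- def DFS(G, x, val, t):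
--     n = len(G)
--     visited = [False] * n
--     parents = [None] * n
--     visited[x] = True
--     stack = [(x, 0)]  # explicit call frames: (node, next neighbour index to try)
--     while stack:
--         u, i = stack[-1]
--         row = G[u]
--         j = i
--         while j < len(row) and not (not visited[j] and row[j] != 0 and abs(row[j] - val) <= t):
--             j += 1
--         if j < len(row):
--             parents[j] = u
--             visited[j] = True
--             stack[-1] = (u, j + 1)
--             stack.append((j, 0))
--         else:
--             stack.pop()
--     return parents
-- ===== Notes on version B (the rewrite author's own statement) =====
-- stated objective: alternative
-- what changed: A's recursive dfs_visit closure mutating shared visited/parents lists is replaced by an iterative traversal over an explicit stack of (node, next-neighbour-index) call frames, which reproduces the exact DFS discovery order without recursion.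
import Mathlib
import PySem

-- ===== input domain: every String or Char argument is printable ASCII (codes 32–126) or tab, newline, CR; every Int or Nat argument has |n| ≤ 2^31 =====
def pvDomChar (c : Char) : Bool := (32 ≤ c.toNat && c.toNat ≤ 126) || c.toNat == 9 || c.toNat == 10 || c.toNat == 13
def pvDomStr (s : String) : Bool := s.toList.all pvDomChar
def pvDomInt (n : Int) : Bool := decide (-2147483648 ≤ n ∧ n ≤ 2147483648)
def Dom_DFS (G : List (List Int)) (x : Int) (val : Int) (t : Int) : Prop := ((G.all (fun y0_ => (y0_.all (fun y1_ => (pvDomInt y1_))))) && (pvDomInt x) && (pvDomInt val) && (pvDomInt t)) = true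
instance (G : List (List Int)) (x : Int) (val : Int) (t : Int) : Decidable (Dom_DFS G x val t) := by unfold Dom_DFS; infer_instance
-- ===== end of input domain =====

-- B replaces A's recursive dfs_visit by an explicit stack of (node, next-index) call frames;
-- equivalence of the RETURN value (the parents list) is proved on Pre_DFS (exactly the inputs
-- where Python A returns; outside it both Pythons raise IndexError).

-- shared translation of the Python expressions G[u] and
-- 'not visited[v] and G[u][v] != 0 and abs(G[u][v] - val) <= t' (identical text in both Pythons)
def pvRow (G : List (List Int)) (u : Int) : List Int := (PySem.List.pyGet? G u).getD []

def pvCond (G : List (List Int)) (val t : Int) (vis : List Bool) (u v : Int) : Bool :=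
  !(PySem.List.pyGetD vis v false) &&
    !(PySem.List.pyGetD (pvRow G u) v 0 == 0) &&
    decide ((((PySem.List.pyGetD (pvRow G u) v 0 - val).natAbs : Int)) ≤ t)

-- ===== PORT A =====
-- dfs_visit, with a fuel argument as a totality guard (recursion depth is < n+1 on Pre_DFS inputs)
def pvVisitA (G : List (List Int)) (val t : Int) :
    Nat → Int → List Bool × List (Option Int) → List Bool × List (Option Int)
  | 0, _, st => st
  | f + 1, u, st =>
    (PySem.List.pyRange 0 ((pvRow G u).length : Int) 1).foldl
      (fun st v =>
        if pvCond G val t st.1 u v then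
          pvVisitA G val t f v (st.1, PySem.List.pySetD st.2 v (some u))
        else st)
      (PySem.List.pySetD st.1 u true, st.2)

def DFS (G : List (List Int)) (x : Int) (val : Int) (t : Int) : List (Option Int) :=
  let n := G.length
  (pvVisitA G val t (n + 1) x (List.replicate n false, List.replicate n none)).2

-- ===== PORT B =====
-- the inner 'while j < len(row) and not cond: j += 1' scan: first index ≥ j satisfying the filter
def pvScan (G : List (List Int)) (val t : Int) (vis : List Bool) (u : Int) (j : Int) : Option Int :=
  if h : j < ((pvRow G u).length : Int) then
    if pvCond G val t vis u j then some j else pvScan G val t vis u (j + 1)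
  else none
  termination_by (((pvRow G u).length : Int) - j).toNat
  decreasing_by omega

-- the 'while stack:' loop, with a fuel argument as a totality guard (iterations are < (n+1)*(m+2) on Pre_DFS inputs)
def pvRunB (G : List (List Int)) (val t : Int) :
    Nat → List (Int × Int) → List Bool × List (Option Int) → List Bool × List (Option Int)
  | _, [], st => st
  | 0, _ :: _, st => st
  | f + 1, (u, i) :: rest, st =>
    match pvScan G val t st.1 u i with
    | some j =>
        pvRunB G val t f ((j, 0) :: (u, j + 1) :: rest)
          (PySem.List.pySetD st.1 j true, PySem.List.pySetD st.2 j (some u))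
    | none => pvRunB G val t f rest st

def pvMaxRow (G : List (List Int)) : Nat := G.foldl (fun a r => max a r.length) 0

def DFS_alt (G : List (List Int)) (x : Int) (val : Int) (t : Int) : List (Option Int) :=
  let n := G.length
  (pvRunB G val t ((n + 1) * (pvMaxRow G + 2)) [(x, 0)]
    (PySem.List.pySetD (List.replicate n false) x true, List.replicate n none)).2

-- ===== PRECONDITION & SPEC =====
-- Pre_DFS is exactly the set of inputs on which Python A returns (both Pythons raise IndexError
-- outside it): the start index x lies in [-n, n), and every node reachable from x through the
-- filtered edges (weight ≠ 0 and |weight - val| ≤ t) has a row of length ≤ n, so that the scan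
-- 'visited[v]' never indexes past the n-element visited list.
def pvX0 (G : List (List Int)) (x : Int) : Nat := (if x < 0 then x + G.length else x).toNat

def pvEdgeB (G : List (List Int)) (val t : Int) (u v : Nat) : Bool :=
  !(PySem.List.pyGetD (pvRow G (u : Int)) (v : Int) 0 == 0) &&
    decide ((((PySem.List.pyGetD (pvRow G (u : Int)) (v : Int) 0 - val).natAbs : Int)) ≤ t)

def pvStep (G : List (List Int)) (val t : Int) (S : Finset Nat) : Finset Nat :=
  S ∪ (Finset.range G.length).filter (fun v => ∃ u ∈ S, pvEdgeB G val t u v = true)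

def pvReach (G : List (List Int)) (val t x : Int) : Finset Nat :=
  (pvStep G val t)^[G.length + 1] {pvX0 G x}

def Pre_DFS (G : List (List Int)) (x : Int) (val : Int) (t : Int) : Prop :=
  (-(G.length : Int) ≤ x ∧ x < (G.length : Int)) ∧
  ∀ u ∈ pvReach G val t x, (pvRow G (u : Int)).length ≤ G.length
instance (G : List (List Int)) (x : Int) (val : Int) (t : Int) : Decidable (Pre_DFS G x val t) := by
  unfold Pre_DFS; infer_instance

def pvWitness_DFS : List (List Int) × Int × Int × Int := ([[0, 2], [2, 0]], 0, 2, 1)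

def Spec_DFS (G : List (List Int)) (x : Int) (val : Int) (t : Int) (out : List (Option Int)) : Prop :=
  out = DFS_alt G x val t
instance (G : List (List Int)) (x : Int) (val : Int) (t : Int) (out : List (Option Int)) :
    Decidable (Spec_DFS G x val t out) := by unfold Spec_DFS; infer_instance

-- ===== CLAIM (what is proved, stated in full; the proofs are below) =====
def Claim_equal_DFS : Prop :=
  ∀ (G : List (List Int)) (x : Int) (val : Int) (t : Int),
    Dom_DFS G x val t → Pre_DFS G x val t → Spec_DFS G x val t (DFS G x val t)

-- ===== LEMMAS AND PROOFS =====

-- ---- reachability facts used to exploit Pre_DFS ----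

lemma pvStep_infl (G : List (List Int)) (val t : Int) (S : Finset Nat) : S ⊆ pvStep G val t S :=
  Finset.subset_union_left

lemma pvIter_subset (G : List (List Int)) (val t : Int) (x0 : Nat) (k : Nat) :
    (pvStep G val t)^[k] {x0} ⊆ insert x0 (Finset.range G.length) := by
  induction k with
  | zero => simp
  | succ k ih =>
    rw [Function.iterate_succ_apply']
    intro a ha
    rcases Finset.mem_union.mp ha with h | h
    · exact ih h
    · exact Finset.mem_insert_of_mem (Finset.mem_filter.mp h).1

lemma pvSubset_iter (G : List (List Int)) (val t : Int) (S : Finset Nat) (k : Nat) :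
    S ⊆ (pvStep G val t)^[k] S := by
  induction k with
  | zero => simp
  | succ k ih =>
    rw [Function.iterate_succ_apply']
    exact ih.trans (pvStep_infl G val t _)

lemma pvGrowth (f : Finset Nat → Finset Nat) (S₀ : Finset Nat) (hinfl : ∀ S, S ⊆ f S) :
    ∀ m, (∀ k < m, f^[k+1] S₀ ≠ f^[k] S₀) → S₀.card + m ≤ (f^[m] S₀).card := by
  intro m
  induction m with
  | zero => simp
  | succ m ih =>
    intro h
    have h1 := ih (fun k hk => h k (by omega))
    have hne : f^[m+1] S₀ ≠ f^[m] S₀ := h m (by omega)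
    have he : f^[m+1] S₀ = f (f^[m] S₀) := Function.iterate_succ_apply' f m S₀
    have hss : f^[m] S₀ ⊂ f^[m+1] S₀ := by
      rw [he]
      refine ssubset_of_subset_of_ne (hinfl _) ?_
      exact fun h2 => hne (he.trans h2.symm)
    have := Finset.card_lt_card hss
    omega

lemma pvReach_fix (G : List (List Int)) (val t x : Int) :
    pvStep G val t (pvReach G val t x) = pvReach G val t x := by
  by_cases hex : ∃ k, k ≤ G.length ∧
      (pvStep G val t)^[k+1] {pvX0 G x} = (pvStep G val t)^[k] {pvX0 G x}
  · obtain ⟨k, hk, heq⟩ := hex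
    have hstab : ∀ j, (pvStep G val t)^[k+j] {pvX0 G x} = (pvStep G val t)^[k] {pvX0 G x} := by
      intro j
      induction j with
      | zero => rfl
      | succ j ih =>
        have hkj : k + (j+1) = (k+j) + 1 := rfl
        rw [hkj, Function.iterate_succ_apply', ih,
          ← Function.iterate_succ_apply' (pvStep G val t) k ({pvX0 G x} : Finset Nat), heq]
    have h1 : pvReach G val t x = (pvStep G val t)^[k] {pvX0 G x} := by
      unfold pvReach
      have hsplit : G.length + 1 = k + (G.length + 1 - k) := by omega
      rw [hsplit, hstab]
    rw [h1, ← Function.iterate_succ_apply' (pvStep G val t) k ({pvX0 G x} : Finset Nat), heq]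
  · rw [not_exists] at hex
    simp only [not_and] at hex
    exfalso
    have hg := pvGrowth (pvStep G val t) {pvX0 G x} (pvStep_infl G val t) (G.length + 1)
      (fun k hk => hex k (by omega))
    have hcard := Finset.card_le_card (pvIter_subset G val t (pvX0 G x) (G.length + 1))
    have hins : (insert (pvX0 G x) (Finset.range G.length)).card ≤ G.length + 1 :=
      (Finset.card_insert_le _ _).trans (by simp)
    have hone : ({pvX0 G x} : Finset Nat).card = 1 := Finset.card_singleton _
    omega

lemma pvX0_mem (G : List (List Int)) (val t x : Int) : pvX0 G x ∈ pvReach G val t x :=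
  pvSubset_iter G val t {pvX0 G x} (G.length + 1) (Finset.mem_singleton_self _)

lemma pvReach_closed (G : List (List Int)) (val t x : Int) (u v : Nat)
    (hu : u ∈ pvReach G val t x) (hv : v < G.length) (he : pvEdgeB G val t u v = true) :
    v ∈ pvReach G val t x := by
  rw [← pvReach_fix G val t x]
  unfold pvStep
  exact Finset.mem_union_right _
    (Finset.mem_filter.mpr ⟨Finset.mem_range.mpr hv, ⟨u, hu, he⟩⟩)

-- ---- normalization of a Python index and the Good (= reachable-node) predicate ----

def pvGood (G : List (List Int)) (val t x : Int) (u : Int) : Prop :=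
  ∃ w : Nat, PySem.List.pyIdx? G.length u = some w ∧ w ∈ pvReach G val t x

lemma pvRow_norm (G : List (List Int)) (u : Int) (w : Nat)
    (h : PySem.List.pyIdx? G.length u = some w) : pvRow G u = pvRow G (w : Int) := by
  unfold pvRow
  rw [PySem.List.pyGet?_natCast]
  unfold PySem.List.pyGet?
  rw [h]
  rfl

lemma pvIdx_nonneg (n : Nat) (v : Int) (h0 : 0 ≤ v) (h1 : v < (n : Int)) :
    PySem.List.pyIdx? n v = some v.toNat := by
  unfold PySem.List.pyIdx?
  rw [if_pos h0, if_pos h1]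

lemma pvIdx_x0 (G : List (List Int)) (x : Int) (h1 : -(G.length : Int) ≤ x)
    (h2 : x < (G.length : Int)) : PySem.List.pyIdx? G.length x = some (pvX0 G x) := by
  unfold PySem.List.pyIdx? pvX0
  by_cases hx : 0 ≤ x
  · rw [if_pos hx, if_pos h2, if_neg (by omega)]
  · rw [if_neg hx, if_pos h1, if_pos (by omega)]
    congr 1
    omega

lemma pvCond_lt (G : List (List Int)) (val t : Int) (vis : List Bool) (u v : Int)
    (h0 : 0 ≤ v) (hc : pvCond G val t vis u v = true) : v < ((pvRow G u).length : Int) := by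
  by_contra hge
  rw [Int.not_lt] at hge
  have hidx : PySem.List.pyIdx? (pvRow G u).length v = none := by
    unfold PySem.List.pyIdx?
    rw [if_pos h0, if_neg (by omega)]
  have hz : PySem.List.pyGetD (pvRow G u) v 0 = 0 := by
    unfold PySem.List.pyGetD PySem.List.pyGet?
    rw [hidx]
    rfl
  unfold pvCond at hc
  rw [hz] at hc
  simp at hc

lemma pvEdge_of_cond (G : List (List Int)) (val t : Int) (vis : List Bool) (u : Int) (w : Nat)
    (v : Int) (heq : pvRow G u = pvRow G (w : Int)) (h0 : 0 ≤ v)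
    (hc : pvCond G val t vis u v = true) : pvEdgeB G val t w v.toNat = true := by
  unfold pvCond at hc
  unfold pvEdgeB
  have hv : ((v.toNat : Nat) : Int) = v := by omega
  rw [hv, ← heq]
  simp only [Bool.and_eq_true] at hc ⊢
  exact ⟨hc.1.2, hc.2⟩

-- ---- A's loop, the aggregated state both machines compute, and the fuel bookkeeping ----

-- A's for-loop over v in range(len(G[u])), started at index i (i = 0 is the loop of dfs_visit u)
def pvLA (G : List (List Int)) (val t : Int) (f : Nat) (u i : Int)
    (st : List Bool × List (Option Int)) : List Bool × List (Option Int) :=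
  (PySem.List.pyRange i ((pvRow G u).length : Int) 1).foldl
    (fun st v =>
      if pvCond G val t st.1 u v then
        pvVisitA G val t f v (st.1, PySem.List.pySetD st.2 v (some u))
      else st)
    st

-- run A's loops for each stack frame in turn: the state B's machine must reach
def pvFF (G : List (List Int)) (val t : Int) (f : Nat) :
    List (Int × Int) → List Bool × List (Option Int) → List Bool × List (Option Int)
  | [], st => st
  | (u, i) :: rest, st => pvFF G val t f rest (pvLA G val t f u i st)

def pvSW (G : List (List Int)) : List (Int × Int) → Nat
  | [] => 0
  | (u, i) :: rest => ((((pvRow G u).length : Int) - i).toNat + 1) + pvSW G rest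

def pvNeed (G : List (List Int)) (st : List Bool × List (Option Int))
    (stack : List (Int × Int)) : Nat :=
  st.1.count false * (pvMaxRow G + 2) + pvSW G stack

lemma pvVisitA_succ (G : List (List Int)) (val t : Int) (f : Nat) (u : Int)
    (st : List Bool × List (Option Int)) :
    pvVisitA G val t (f + 1) u st = pvLA G val t f u 0 (PySem.List.pySetD st.1 u true, st.2) := rfl

lemma pvLA_nil (G : List (List Int)) (val t : Int) (f : Nat) (u i : Int)
    (st : List Bool × List (Option Int)) (h : ((pvRow G u).length : Int) ≤ i) :
    pvLA G val t f u i st = st := by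
  simp [pvLA, PySem.List.pyRange_one_eq_nil h]

lemma pvLA_cons (G : List (List Int)) (val t : Int) (f : Nat) (u i : Int)
    (st : List Bool × List (Option Int)) (h : i < ((pvRow G u).length : Int)) :
    pvLA G val t f u i st =
      pvLA G val t f u (i + 1)
        (if pvCond G val t st.1 u i then
          pvVisitA G val t f i (st.1, PySem.List.pySetD st.2 i (some u)) else st) := by
  rw [pvLA, PySem.List.pyRange_one_cons h, List.foldl_cons, pvLA]

lemma pvFoldMax_le (G : List (List Int)) : ∀ (a : Nat), a ≤ G.foldl (fun a r => max a r.length) a ∧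
    ∀ r ∈ G, r.length ≤ G.foldl (fun a r => max a r.length) a := by
  induction G with
  | nil => simp
  | cons h tl ih =>
    intro a
    refine ⟨le_trans (le_max_left a h.length) (ih (max a h.length)).1, ?_⟩
    intro r hr
    rcases List.mem_cons.mp hr with hr | hr
    · subst hr; exact le_trans (le_max_right a r.length) (ih (max a r.length)).1
    · exact (ih (max a h.length)).2 _ hr

lemma pvRowLen_le_max (G : List (List Int)) (u : Int) : (pvRow G u).length ≤ pvMaxRow G := by
  unfold pvRow pvMaxRow
  cases h : PySem.List.pyGet? G u with
  | none => simp
  | some r =>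
    simp only [Option.getD_some]
    exact (pvFoldMax_le G 0).2 _ (PySem.List.mem_of_pyGet?_eq_some _ h)

lemma pvSet_count_le (xs : List Bool) : ∀ (k : Nat), (xs.set k true).count false ≤ xs.count false := by
  induction xs with
  | nil => simp
  | cons a tl ih =>
    intro k
    cases k with
    | zero => cases a <;> simp [List.count_cons]
    | succ k => cases a <;> simp <;> exact ih k

lemma pvSetD_count_le (xs : List Bool) (i : Int) :
    (PySem.List.pySetD xs i true).count false ≤ xs.count false := by
  unfold PySem.List.pySetD PySem.List.pySet?
  cases h : PySem.List.pyIdx? xs.length i with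
  | none => simp
  | some k => simpa using pvSet_count_le xs k

lemma pvSet_count_strict (xs : List Bool) : ∀ (k : Nat), k < xs.length → xs[k]! = false →
    (xs.set k true).count false + 1 = xs.count false := by
  induction xs with
  | nil => simp
  | cons a tl ih =>
    intro k hk hx
    cases k with
    | zero => simp at hx; subst hx; simp [List.count_cons]
    | succ k =>
      simp at hk hx
      cases a <;> simp [List.count_cons] <;>
        [skip; exact ih k hk (by simpa [getElem!_pos, hk] using hx)]
      · have := ih k hk (by simpa [getElem!_pos, hk] using hx); omega

lemma pvSetD_count_strict (xs : List Bool) (i : Int) (h0 : 0 ≤ i) (h1 : i < (xs.length : Int))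
    (hf : PySem.List.pyGetD xs i false = false) :
    (PySem.List.pySetD xs i true).count false + 1 = xs.count false := by
  rw [PySem.List.pySetD_of_nonneg _ _ h0]
  rw [PySem.List.pyGetD_eq_getElem _ _ h0 h1] at hf
  exact pvSet_count_strict xs i.toNat (by omega) (by simp [getElem!_pos, show i.toNat < xs.length by omega, hf])

lemma pvCount_pos (xs : List Bool) (i : Int) (h0 : 0 ≤ i) (h1 : i < (xs.length : Int))
    (hf : PySem.List.pyGetD xs i false = false) : 0 < xs.count false := by
  have := pvSetD_count_strict xs i h0 h1 hf; omega

lemma pvCond_vis_false (G : List (List Int)) (val t : Int) (vis : List Bool) (u i : Int)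
    (hc : pvCond G val t vis u i = true) : PySem.List.pyGetD vis i false = false := by
  unfold pvCond at hc
  simp only [Bool.and_eq_true, Bool.not_eq_true'] at hc
  exact hc.1.1

lemma pvLA_mono_aux (G : List (List Int)) (val t : Int) (f : Nat)
    (hv : ∀ (u : Int) (st : List Bool × List (Option Int)),
      (pvVisitA G val t f u st).1.length = st.1.length ∧
      (pvVisitA G val t f u st).1.count false ≤ st.1.count false) :
    ∀ (k : Nat) (u i : Int) (st : List Bool × List (Option Int)),
      ((((pvRow G u).length : Int) - i).toNat = k) →
      (pvLA G val t f u i st).1.length = st.1.length ∧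
      (pvLA G val t f u i st).1.count false ≤ st.1.count false := by
  intro k
  induction k using Nat.strong_induction_on with
  | _ k ihk =>
    intro u i st hk
    by_cases hlt : i < ((pvRow G u).length : Int)
    · rw [pvLA_cons G val t f u i st hlt]
      have hrec := ihk ((((pvRow G u).length : Int) - (i+1)).toNat) (by omega) u (i+1)
        (if pvCond G val t st.1 u i then
          pvVisitA G val t f i (st.1, PySem.List.pySetD st.2 i (some u)) else st) rfl
      by_cases hc : pvCond G val t st.1 u i = true
      · rw [if_pos hc] at hrec ⊢
        have h1 := hv i (st.1, PySem.List.pySetD st.2 i (some u))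
        exact ⟨hrec.1.trans h1.1, hrec.2.trans h1.2⟩
      · rw [if_neg hc] at hrec ⊢; exact hrec
    · rw [pvLA_nil G val t f u i st (by omega)]; exact ⟨rfl, le_refl _⟩

lemma pvVisitA_mono (G : List (List Int)) (val t : Int) :
    ∀ (f : Nat) (u : Int) (st : List Bool × List (Option Int)),
      (pvVisitA G val t f u st).1.length = st.1.length ∧
      (pvVisitA G val t f u st).1.count false ≤ st.1.count false := by
  intro f
  induction f with
  | zero => intro u st; exact ⟨rfl, le_refl _⟩
  | succ f ih =>
    intro u st
    rw [pvVisitA_succ]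
    have h := pvLA_mono_aux G val t f ih _ u 0 (PySem.List.pySetD st.1 u true, st.2) rfl
    refine ⟨h.1.trans (PySem.List.length_pySetD _ _ _), h.2.trans (pvSetD_count_le _ _)⟩

lemma pvLA_stab (G : List (List Int)) (val t : Int) (Good : Int → Prop)
    (hcl : ∀ (u v : Int) (vis : List Bool), Good u → 0 ≤ v →
      pvCond G val t vis u v = true → Good v)
    (hrow : ∀ u : Int, Good u → (pvRow G u).length ≤ G.length) :
    ∀ (N : Nat) (u i : Int) (st : List Bool × List (Option Int)) (f₁ f₂ : Nat), Good u → 0 ≤ i →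
      st.1.length = G.length → st.1.count false ≤ N →
      st.1.count false ≤ f₁ → st.1.count false ≤ f₂ →
      pvLA G val t f₁ u i st = pvLA G val t f₂ u i st := by
  intro N
  induction N using Nat.strong_induction_on with
  | _ N ihN =>
    have inner : ∀ (k : Nat) (u i : Int) (st : List Bool × List (Option Int)) (f₁ f₂ : Nat),
        ((((pvRow G u).length : Int) - i).toNat = k) → Good u → 0 ≤ i →
        st.1.length = G.length → st.1.count false ≤ N →
        st.1.count false ≤ f₁ → st.1.count false ≤ f₂ →
        pvLA G val t f₁ u i st = pvLA G val t f₂ u i st := by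
      intro k
      induction k using Nat.strong_induction_on with
      | _ k ihk =>
        intro u i st f₁ f₂ hk hgu hi hlen hN h1 h2
        by_cases hlt : i < ((pvRow G u).length : Int)
        · rw [pvLA_cons G val t f₁ u i st hlt, pvLA_cons G val t f₂ u i st hlt]
          by_cases hc : pvCond G val t st.1 u i = true
          · have hvis : PySem.List.pyGetD st.1 i false = false := pvCond_vis_false G val t st.1 u i hc
            have hbound : i < (st.1.length : Int) := by
              have := hrow u hgu; omega
            have hgi : Good i := hcl u i st.1 hgu hi hc
            have hpos : 0 < st.1.count false := pvCount_pos st.1 i hi hbound hvis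
            obtain ⟨g₁, rfl⟩ : ∃ g, f₁ = g + 1 := ⟨f₁ - 1, by omega⟩
            obtain ⟨g₂, rfl⟩ : ∃ g, f₂ = g + 1 := ⟨f₂ - 1, by omega⟩
            have hveq : pvVisitA G val t (g₁+1) i (st.1, PySem.List.pySetD st.2 i (some u)) =
                pvVisitA G val t (g₂+1) i (st.1, PySem.List.pySetD st.2 i (some u)) := by
              rw [pvVisitA_succ, pvVisitA_succ]
              have hcnt : (PySem.List.pySetD st.1 i true).count false + 1 = st.1.count false :=
                pvSetD_count_strict st.1 i hi hbound hvis
              exact ihN (N-1) (by omega) i 0 _ g₁ g₂ hgi (le_refl 0)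
                (by simpa [PySem.List.length_pySetD] using hlen) (by simp; omega)
                (by simp; omega) (by simp; omega)
            rw [if_pos hc, if_pos hc, hveq]
            have hmono := pvVisitA_mono G val t (g₂+1) i (st.1, PySem.List.pySetD st.2 i (some u))
            exact ihk ((((pvRow G u).length : Int) - (i+1)).toNat) (by omega) u (i+1) _ _ _
              rfl hgu (by omega) (by rw [hmono.1]; exact hlen)
              (le_trans hmono.2 hN) (le_trans hmono.2 (by omega)) (le_trans hmono.2 (by omega))
          · rw [if_neg hc, if_neg hc]
            exact ihk ((((pvRow G u).length : Int) - (i+1)).toNat) (by omega) u (i+1) st f₁ f₂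
              rfl hgu (by omega) hlen hN h1 h2
        · rw [pvLA_nil G val t f₁ u i st (by omega), pvLA_nil G val t f₂ u i st (by omega)]
    exact fun u i st f₁ f₂ => inner _ u i st f₁ f₂ rfl

lemma pvScan_none (G : List (List Int)) (val t : Int) (vis : List Bool) (u : Int) :
    ∀ (i : Int), pvScan G val t vis u i = none →
      ∀ v : Int, i ≤ v → v < ((pvRow G u).length : Int) → pvCond G val t vis u v = false := by
  have key : ∀ (k : Nat) (i : Int), ((((pvRow G u).length : Int) - i).toNat = k) →
      pvScan G val t vis u i = none →
      ∀ v : Int, i ≤ v → v < ((pvRow G u).length : Int) → pvCond G val t vis u v = false := by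
    intro k
    induction k using Nat.strong_induction_on with
    | _ k ihk =>
      intro i hk hs v hiv hv
      rw [pvScan] at hs
      by_cases hlt : i < ((pvRow G u).length : Int)
      · rw [dif_pos hlt] at hs
        by_cases hc : pvCond G val t vis u i = true
        · rw [if_pos hc] at hs; exact absurd hs (by simp)
        · rw [if_neg hc] at hs
          rcases eq_or_lt_of_le hiv with h | h
          · subst h; simpa using hc
          · exact ihk ((((pvRow G u).length : Int) - (i+1)).toNat) (by omega) (i+1) rfl hs v (by omega) hv
      · omega
  exact fun i => key _ i rfl

lemma pvScan_some (G : List (List Int)) (val t : Int) (vis : List Bool) (u : Int) :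
    ∀ (i j : Int), pvScan G val t vis u i = some j →
      i ≤ j ∧ j < ((pvRow G u).length : Int) ∧ pvCond G val t vis u j = true ∧
      ∀ v : Int, i ≤ v → v < j → pvCond G val t vis u v = false := by
  have key : ∀ (k : Nat) (i j : Int), ((((pvRow G u).length : Int) - i).toNat = k) →
      pvScan G val t vis u i = some j →
      i ≤ j ∧ j < ((pvRow G u).length : Int) ∧ pvCond G val t vis u j = true ∧
      ∀ v : Int, i ≤ v → v < j → pvCond G val t vis u v = false := by
    intro k
    induction k using Nat.strong_induction_on with
    | _ k ihk =>
      intro i j hk hs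
      rw [pvScan] at hs
      by_cases hlt : i < ((pvRow G u).length : Int)
      · rw [dif_pos hlt] at hs
        by_cases hc : pvCond G val t vis u i = true
        · rw [if_pos hc] at hs
          obtain rfl : i = j := by simpa using hs
          exact ⟨le_refl _, hlt, hc, fun v h1 h2 => by omega⟩
        · rw [if_neg hc] at hs
          obtain ⟨h1, h2, h3, h4⟩ := ihk ((((pvRow G u).length : Int) - (i+1)).toNat) (by omega) (i+1) j rfl hs
          refine ⟨by omega, h2, h3, fun v hv1 hv2 => ?_⟩
          rcases eq_or_lt_of_le hv1 with h | h
          · subst h; simpa using hc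
          · exact h4 v (by omega) hv2
      · rw [dif_neg hlt] at hs; exact absurd hs (by simp)
  exact fun i j => key _ i j rfl

lemma pvLA_skip (G : List (List Int)) (val t : Int) (f : Nat) (u : Int) :
    ∀ (i : Int) (st : List Bool × List (Option Int)),
      (∀ v : Int, i ≤ v → v < ((pvRow G u).length : Int) → pvCond G val t st.1 u v = false) →
      pvLA G val t f u i st = st := by
  have key : ∀ (k : Nat) (i : Int) (st : List Bool × List (Option Int)),
      ((((pvRow G u).length : Int) - i).toNat = k) →
      (∀ v : Int, i ≤ v → v < ((pvRow G u).length : Int) → pvCond G val t st.1 u v = false) →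
      pvLA G val t f u i st = st := by
    intro k
    induction k using Nat.strong_induction_on with
    | _ k ihk =>
      intro i st hk hall
      by_cases hlt : i < ((pvRow G u).length : Int)
      · rw [pvLA_cons G val t f u i st hlt, if_neg (by simp [hall i (le_refl i) hlt])]
        exact ihk ((((pvRow G u).length : Int) - (i+1)).toNat) (by omega) (i+1) st rfl
          (fun v h1 h2 => hall v (by omega) h2)
      · exact pvLA_nil G val t f u i st (by omega)
  exact fun i st => key _ i st rfl

lemma pvLA_step (G : List (List Int)) (val t : Int) (f : Nat) (u : Int) :
    ∀ (i j : Int) (st : List Bool × List (Option Int)), i ≤ j →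
      j < ((pvRow G u).length : Int) → pvCond G val t st.1 u j = true →
      (∀ v : Int, i ≤ v → v < j → pvCond G val t st.1 u v = false) →
      pvLA G val t f u i st =
        pvLA G val t f u (j + 1) (pvVisitA G val t f j (st.1, PySem.List.pySetD st.2 j (some u))) := by
  have key : ∀ (k : Nat) (i j : Int) (st : List Bool × List (Option Int)),
      ((j - i).toNat = k) → i ≤ j →
      j < ((pvRow G u).length : Int) → pvCond G val t st.1 u j = true →
      (∀ v : Int, i ≤ v → v < j → pvCond G val t st.1 u v = false) →
      pvLA G val t f u i st =
        pvLA G val t f u (j + 1) (pvVisitA G val t f j (st.1, PySem.List.pySetD st.2 j (some u))) := by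
    intro k
    induction k using Nat.strong_induction_on with
    | _ k ihk =>
      intro i j st hk hij hjl hc hpre
      rcases eq_or_lt_of_le hij with h | h
      · subst h
        rw [pvLA_cons G val t f u i st hjl, if_pos hc]
      · rw [pvLA_cons G val t f u i st (by omega), if_neg (by simp [hpre i (le_refl i) h])]
        exact ihk ((j - (i+1)).toNat) (by omega) (i+1) j st rfl (by omega) hjl hc
          (fun v h1 h2 => hpre v (by omega) h2)
  exact fun i j st => key _ i j st rfl

lemma pvSIM (G : List (List Int)) (val t : Int) (Good : Int → Prop)
    (hcl : ∀ (u v : Int) (vis : List Bool), Good u → 0 ≤ v →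
      pvCond G val t vis u v = true → Good v)
    (hrow : ∀ u : Int, Good u → (pvRow G u).length ≤ G.length) (fA : Nat) :
    ∀ (fB : Nat) (stack : List (Int × Int)) (st : List Bool × List (Option Int)),
      st.1.length = G.length → (∀ fr ∈ stack, 0 ≤ fr.2 ∧ Good fr.1) →
      pvNeed G st stack ≤ fB → st.1.count false + 1 ≤ fA →
      pvRunB G val t fB stack st = pvFF G val t fA stack st := by
  intro fB
  induction fB with
  | zero =>
    intro stack st hlen hfr hneed hfA
    cases stack with
    | nil => rfl
    | cons fr rest =>
      exfalso
      rcases fr with ⟨u, i⟩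
      simp only [pvNeed, pvSW] at hneed
      omega
  | succ fB ih =>
    intro stack st hlen hfr hneed hfA
    cases stack with
    | nil => rfl
    | cons fr rest =>
      rcases fr with ⟨u, i⟩
      have hi : (0:Int) ≤ i := (hfr (u, i) (by simp)).1
      have hgu : Good u := (hfr (u, i) (by simp)).2
      cases hs : pvScan G val t st.1 u i with
      | none =>
        have hall := pvScan_none G val t st.1 u i hs
        show pvRunB G val t (fB+1) ((u,i)::rest) st = _
        rw [pvRunB]
        simp only [hs]
        rw [ih rest st hlen (fun fr h => hfr fr (by simp [h])) (by simp [pvNeed, pvSW] at hneed ⊢; omega) hfA]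
        show pvFF G val t fA rest st = pvFF G val t fA ((u,i)::rest) st
        rw [pvFF, pvLA_skip G val t fA u i st hall]
      | some j =>
        obtain ⟨hij, hjl, hc, hpre⟩ := pvScan_some G val t st.1 u i j hs
        have hvis : PySem.List.pyGetD st.1 j false = false := pvCond_vis_false G val t st.1 u j hc
        have hjb : j < (st.1.length : Int) := by have := hrow u hgu; omega
        have hj0 : (0:Int) ≤ j := by omega
        have hgj : Good j := hcl u j st.1 hgu hj0 hc
        have hcnt : (PySem.List.pySetD st.1 j true).count false + 1 = st.1.count false :=
          pvSetD_count_strict st.1 j hj0 hjb hvis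
        set st' : List Bool × List (Option Int) :=
          (PySem.List.pySetD st.1 j true, PySem.List.pySetD st.2 j (some u)) with hst'
        show pvRunB G val t (fB+1) ((u,i)::rest) st = _
        rw [pvRunB]
        simp only [hs]
        have hlen' : st'.1.length = G.length := by
          simpa [hst', PySem.List.length_pySetD] using hlen
        have hrowj := pvRowLen_le_max G j
        have hrowu := pvRowLen_le_max G u
        have hneed' : pvNeed G st' ((j,0) :: (u, j+1) :: rest) ≤ fB := by
          simp only [pvNeed, pvSW, hst'] at hneed ⊢
          obtain ⟨c, hcc⟩ : ∃ c, st.1.count false = c + 1 := ⟨st.1.count false - 1, by omega⟩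
          rw [hcc] at hneed
          have : (PySem.List.pySetD st.1 j true).count false = c := by omega
          rw [this]
          rw [Nat.succ_mul] at hneed
          omega
        rw [ih ((j,0) :: (u, j+1) :: rest) st' hlen'
          (by
            intro fr h
            rcases List.mem_cons.mp h with rfl | h
            · exact ⟨le_refl 0, hgj⟩
            · rcases List.mem_cons.mp h with rfl | h
              · exact ⟨by omega, hgu⟩
              · exact hfr fr (List.mem_cons_of_mem _ h))
          hneed' (by
            show (PySem.List.pySetD st.1 j true).count false + 1 ≤ fA
            omega)]
        -- now relate the two pvFF forms
        show pvFF G val t fA ((j,0) :: (u, j+1) :: rest) st' = pvFF G val t fA ((u,i)::rest) st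
        rw [pvFF, pvFF, pvFF]
        congr 1
        -- pvLA fA u (j+1) (pvLA fA j 0 st') = pvLA fA u i st
        obtain ⟨g, rfl⟩ : ∃ g, fA = g + 1 := ⟨fA - 1, by omega⟩
        rw [pvLA_step G val t (g+1) u i j st hij hjl hc hpre]
        rw [pvVisitA_succ]
        congr 1
        show pvLA G val t (g+1) j 0 st' = pvLA G val t g j 0 st'
        exact (pvLA_stab G val t Good hcl hrow ((PySem.List.pySetD st.1 j true).count false) j 0 st' g (g+1)
          hgj (le_refl 0) hlen' (le_refl _) (by
            show (PySem.List.pySetD st.1 j true).count false ≤ g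
            omega)
          (by
            show (PySem.List.pySetD st.1 j true).count false ≤ g + 1
            omega)).symm

-- ===== VERDICT (by name: the statement is the Claim_ definition above) =====
theorem DFS_spec : Claim_equal_DFS := by
  intro G x val t _hDom hPre
  obtain ⟨⟨hx1, hx2⟩, hR⟩ := hPre
  -- the reachable-node predicate: Pre_DFS bounds the row length of every Good node
  set Good : Int → Prop := pvGood G val t x with hGood
  have hcl : ∀ (u v : Int) (vis : List Bool), Good u → 0 ≤ v →
      pvCond G val t vis u v = true → Good v := by
    intro u v vis hgu h0 hc
    obtain ⟨w, hidx, hmem⟩ := hgu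
    have heq := pvRow_norm G u w hidx
    have hlt := pvCond_lt G val t vis u v h0 hc
    have hlen : (pvRow G u).length ≤ G.length := by rw [heq]; exact hR w hmem
    refine ⟨v.toNat, pvIdx_nonneg G.length v h0 (by omega), ?_⟩
    exact pvReach_closed G val t x w v.toNat hmem (by omega)
      (pvEdge_of_cond G val t vis u w v heq h0 hc)
  have hrow : ∀ u : Int, Good u → (pvRow G u).length ≤ G.length := by
    intro u hgu
    obtain ⟨w, hidx, hmem⟩ := hgu
    rw [pvRow_norm G u w hidx]
    exact hR w hmem
  have hgx : Good x := ⟨pvX0 G x, pvIdx_x0 G x hx1 hx2, pvX0_mem G val t x⟩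
  unfold Spec_DFS DFS DFS_alt
  simp only []
  set n := G.length with hn
  set st0' : List Bool × List (Option Int) :=
    (PySem.List.pySetD (List.replicate n false) x true, List.replicate n none) with hst0
  have hlen : st0'.1.length = n := by simp [hst0, PySem.List.length_pySetD]
  have hcle : st0'.1.count false ≤ n := by
    calc st0'.1.count false ≤ st0'.1.length := List.count_le_length
    _ = n := hlen
  have hA : pvVisitA G val t (n + 1) x (List.replicate n false, List.replicate n none) =
      pvLA G val t n x 0 st0' := by rw [pvVisitA_succ]
  have hstab : pvLA G val t n x 0 st0' = pvLA G val t (n+1) x 0 st0' :=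
    pvLA_stab G val t Good hcl hrow (st0'.1.count false) x 0 st0' n (n+1) hgx (le_refl 0) hlen
      (le_refl _) hcle (by omega)
  have hB := pvSIM G val t Good hcl hrow (n+1) ((n + 1) * (pvMaxRow G + 2)) [(x, 0)] st0' hlen
    (by simpa using hgx) ?hneed (by omega)
  case hneed =>
    simp only [pvNeed, pvSW]
    have h1 : ((((pvRow G x).length : Int) - 0).toNat) = (pvRow G x).length := by omega
    rw [h1]
    have h2 := pvRowLen_le_max G x
    have h3 : st0'.1.count false * (pvMaxRow G + 2) ≤ n * (pvMaxRow G + 2) :=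
      Nat.mul_le_mul_right _ hcle
    have h4 : (n+1) * (pvMaxRow G + 2) = n * (pvMaxRow G + 2) + (pvMaxRow G + 2) := by ring
    omega
  rw [hA, hstab, hB]
  show _ = (pvFF G val t (n+1) [(x,0)] st0').2
  rw [pvFF, pvFF]
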